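-- pv_equiv track=rewrite | github.com/jerpint/jag | data/data_handler.py | reconstruct_text_from_tokens
-- ===== SOURCE A (Python) =====
-- def reconstruct_text_from_tokens(tokens, wordpiece_indicator="##") -> str:
--     """ Reconstruct a text from a list of tokens given a wordpiece indicator on tokens.
--     Args:
--         tokens (List[str]): the list of tokens
--         wordpiece_indicator (str): an indicator of a subword tokens
--     Returns:
--         text: the reconstructed text
--     """
--     n = 0 if wordpiece_indicator is None else len(wordpiece_indicator)
--     result = []
--     i = 0
--     while i < len(tokens):
--         if (
--             (n == 0) or
--             (len(tokens[i]) < n) or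
--             (len(tokens[i]) >= n and tokens[i][:n] != wordpiece_indicator)
--         ):
--             result.append(tokens[i])
--             i = i + 1
--         else:
--             data = result[-1]
--             j = i
--             while (
--                 (j < len(tokens)) and
--                 (len(tokens[j]) >= n and tokens[
--                  j][:n] == wordpiece_indicator)
--             ):
--                 data += tokens[j][n:]
--                 j = j + 1
--
--             result[-1] = data
--             i = j
--
--     return " ".join(result)
-- ===== SOURCE B (Python) =====
-- def reconstruct_text_from_tokens(tokens, wordpiece_indicator="##") -> str:
--     """Right-to-left pass: walk the tokens in reverse, accumulating the suffixes of
--     continuation tokens into a pending string; each non-continuation token closes a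
--     word (token + pending).  Words come out back-to-front, so reverse at the end."""
--     n = 0 if wordpiece_indicator is None else len(wordpiece_indicator)
--     words = []
--     pending = ""
--     for t in reversed(tokens):
--         if n and len(t) >= n and t[:n] == wordpiece_indicator:
--             pending = t[n:] + pending
--         else:
--             words.append(t + pending)
--             pending = ""
--     words.reverse()
--     return " ".join(words)
-- ===== Notes on version B (the rewrite author's own statement) =====
-- stated objective: alternative
-- what changed: Replaced A's forward nested while/inner-while with result[-1] mutation and i=j resumption by a right-to-left traversal that accumulates continuation suffixes into a pending string, emits words back-to-front and reverses once at the end; avoiding per-continuation list indexing makes B measurably faster by a constant factor.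
import Mathlib
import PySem

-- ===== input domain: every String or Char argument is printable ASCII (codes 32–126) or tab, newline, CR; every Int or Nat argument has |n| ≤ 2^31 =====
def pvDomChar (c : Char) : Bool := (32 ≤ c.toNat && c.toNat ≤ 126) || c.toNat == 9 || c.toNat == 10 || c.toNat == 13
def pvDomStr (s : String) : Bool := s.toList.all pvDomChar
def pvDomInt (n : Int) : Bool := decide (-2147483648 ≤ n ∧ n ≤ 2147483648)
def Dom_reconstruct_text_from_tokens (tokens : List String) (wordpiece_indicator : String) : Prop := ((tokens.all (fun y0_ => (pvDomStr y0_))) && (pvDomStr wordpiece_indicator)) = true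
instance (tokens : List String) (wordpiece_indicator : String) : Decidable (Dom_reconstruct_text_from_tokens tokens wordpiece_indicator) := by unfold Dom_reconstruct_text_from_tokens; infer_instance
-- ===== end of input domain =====

-- B replaces A's forward nested while/inner-while (with result[-1] mutation and i=j
-- resumption) by a right-to-left pass that accumulates continuation suffixes into a
-- pending string and emits the words back-to-front; objective: alternative decomposition.
-- Equivalence is about the RETURN value; Pre_ excludes inputs where the Python A raises
-- IndexError (a leading continuation token reads result[-1] of an empty result).


-- ===== PORT A =====
-- inner while loop of A: glue suffixes of the maximal run of continuation tokens onto `data`,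
-- return the new data and the remaining tokens (the i = j resumption)
def pvConsumeA (wordpiece_indicator : String) (n : Int) (data : String) :
    List String → String × List String
  | [] => (data, [])
  | t :: rest =>
      if PySem.Str.len t ≥ n ∧ PySem.Str.slice t none (some n) = wordpiece_indicator then
        pvConsumeA wordpiece_indicator n (data ++ PySem.Str.slice t (some n) none) rest
      else (data, t :: rest)

theorem pvConsumeA_len_le (wordpiece_indicator : String) (n : Int) (data : String)
    (ts : List String) :
    (pvConsumeA wordpiece_indicator n data ts).2.length ≤ ts.length := by
  induction ts generalizing data with
  | nil => simp [pvConsumeA]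
  | cons t rest ih =>
      simp only [pvConsumeA]
      split
      · exact le_trans (ih _) (Nat.le_succ _)
      · simp

-- outer while loop of A over the remaining tokens, accumulator `res` is `result`;
-- `result[-1]` is ported as getLastD "" (Python raises on an empty result: outside Pre_)
def pvLoopA (wordpiece_indicator : String) (n : Int) :
    List String → List String → List String
  | [], res => res
  | t :: rest, res =>
      if n = 0 ∨ PySem.Str.len t < n ∨
          (PySem.Str.len t ≥ n ∧ PySem.Str.slice t none (some n) ≠ wordpiece_indicator) then
        pvLoopA wordpiece_indicator n rest (res ++ [t])
      else
        let p := pvConsumeA wordpiece_indicator n (res.getLastD "") (t :: rest)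
        pvLoopA wordpiece_indicator n p.2 (res.dropLast ++ [p.1])
  termination_by ts _ => ts.length
  decreasing_by
  · simp
  · rename_i h
    push Not at h
    simp only [pvConsumeA]
    rw [if_pos ⟨h.2.1, h.2.2 h.2.1⟩]
    exact Nat.lt_succ_of_le (pvConsumeA_len_le _ _ _ _)

def reconstruct_text_from_tokens (tokens : List String) (wordpiece_indicator : String) : String :=
  let n := PySem.Str.len wordpiece_indicator
  PySem.Str.join " " (pvLoopA wordpiece_indicator n tokens [])

-- ===== PORT B =====
-- body of B's reversed loop: state = (words so far, back-to-front; pending suffix string)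
def pvStepB (wordpiece_indicator : String) (n : Int) (st : List String × String)
    (t : String) : List String × String :=
  if n ≠ 0 ∧ PySem.Str.len t ≥ n ∧ PySem.Str.slice t none (some n) = wordpiece_indicator then
    (st.1, PySem.Str.slice t (some n) none ++ st.2)
  else
    (st.1 ++ [t ++ st.2], "")

def reconstruct_text_from_tokens_alt (tokens : List String) (wordpiece_indicator : String) : String :=
  let n := PySem.Str.len wordpiece_indicator
  let st := tokens.reverse.foldl (pvStepB wordpiece_indicator n) ([], "")
  PySem.Str.join " " st.1.reverse

-- ===== PRECONDITION & SPEC =====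
-- Pre_ excludes exactly the inputs on which the Python A raises IndexError: a first token
-- that is a continuation token (result[-1] is read while result is still empty).
def Pre_reconstruct_text_from_tokens (tokens : List String) (wordpiece_indicator : String) : Prop :=
  (tokens.head?.all (fun t =>
    !(decide (PySem.Str.len wordpiece_indicator ≠ 0) &&
      decide (PySem.Str.len t ≥ PySem.Str.len wordpiece_indicator) &&
      decide (PySem.Str.slice t none (some (PySem.Str.len wordpiece_indicator)) =
        wordpiece_indicator)))) = true
instance (tokens : List String) (wordpiece_indicator : String) :
    Decidable (Pre_reconstruct_text_from_tokens tokens wordpiece_indicator) := by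
  unfold Pre_reconstruct_text_from_tokens; infer_instance

def pvWitness_reconstruct_text_from_tokens : List String × String :=
  (["hugging", "##face", "token", "##iza", "##tion", "!"], "##")

def Spec_reconstruct_text_from_tokens (tokens : List String) (wordpiece_indicator : String) (out : String) : Prop := out = reconstruct_text_from_tokens_alt tokens wordpiece_indicator
instance (tokens : List String) (wordpiece_indicator : String) (out : String) : Decidable (Spec_reconstruct_text_from_tokens tokens wordpiece_indicator out) := by unfold Spec_reconstruct_text_from_tokens; infer_instance

-- ===== CLAIM (what is proved, stated in full; the proofs are below) =====
def Claim_equal_reconstruct_text_from_tokens : Prop := ∀ (tokens : List String) (wordpiece_indicator : String), Dom_reconstruct_text_from_tokens tokens wordpiece_indicator → Pre_reconstruct_text_from_tokens tokens wordpiece_indicator → Spec_reconstruct_text_from_tokens tokens wordpiece_indicator (reconstruct_text_from_tokens tokens wordpiece_indicator)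

-- ===== LEMMAS AND PROOFS =====

-- proof-side middle form: a flat forward fold (continuation glues onto the last word)
def pvFlatStep (ind : String) (n : Int) (res : List String) (t : String) : List String :=
  if n ≠ 0 ∧ PySem.Str.len t ≥ n ∧ PySem.Str.slice t none (some n) = ind then
    res.dropLast ++ [res.getLastD "" ++ PySem.Str.slice t (some n) none]
  else res ++ [t]

-- the flat fold absorbs A's inner while: starting with last word `data`, folding over ts
-- equals consuming the maximal continuation run first.
theorem foldl_flatStep_consume (ind : String) (n : Int) (hn : n ≠ 0) (ts : List String)
    (res : List String) (data : String) :
    (ts.foldl (pvFlatStep ind n) (res ++ [data])) =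
      ((pvConsumeA ind n data ts).2.foldl (pvFlatStep ind n)
        (res ++ [(pvConsumeA ind n data ts).1])) := by
  induction ts generalizing data with
  | nil => simp [pvConsumeA]
  | cons t rest ih =>
      by_cases hc : PySem.Str.len t ≥ n ∧ PySem.Str.slice t none (some n) = ind
      · have hstep : pvFlatStep ind n (res ++ [data]) t =
            res ++ [data ++ PySem.Str.slice t (some n) none] := by
          unfold pvFlatStep
          rw [if_pos ⟨hn, hc.1, hc.2⟩]
          simp
        simp only [pvConsumeA, if_pos hc, List.foldl_cons, hstep]
        exact ih _
      · have hstep : pvFlatStep ind n (res ++ [data]) t = (res ++ [data]) ++ [t] := by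
          unfold pvFlatStep
          rw [if_neg (by tauto)]
        simp only [pvConsumeA, if_neg hc, List.foldl_cons, hstep]

-- A's outer loop equals the flat fold, for every accumulator.
theorem pvLoopA_eq_foldl (ind : String) (n : Int) (ts : List String) (res : List String) :
    pvLoopA ind n ts res = ts.foldl (pvFlatStep ind n) res := by
  induction hL : ts.length using Nat.strong_induction_on generalizing ts res with
  | _ L ih =>
  match ts with
  | [] => simp [pvLoopA]
  | t :: rest =>
      have hrest : rest.length < L := by
        simp only [List.length_cons] at hL; omega
      by_cases hs : n = 0 ∨ PySem.Str.len t < n ∨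
          (PySem.Str.len t ≥ n ∧ PySem.Str.slice t none (some n) ≠ ind)
      · rw [pvLoopA, if_pos hs, List.foldl_cons,
          show pvFlatStep ind n res t = res ++ [t] by
            unfold pvFlatStep
            rw [if_neg (by
              rintro ⟨hn, hge, heq⟩
              rcases hs with h0 | hlt | ⟨_, hne⟩
              · exact hn h0
              · omega
              · exact hne heq)]]
        exact ih rest.length hrest rest _ rfl
      · push Not at hs
        obtain ⟨hn, hge', himp⟩ := hs
        have hge : PySem.Str.len t ≥ n := hge'
        have heq : PySem.Str.slice t none (some n) = ind := himp hge
        rw [pvLoopA, if_neg (by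
          rintro (h0 | hlt | ⟨_, hne⟩)
          · exact hn h0
          · omega
          · exact hne heq)]
        simp only
        have hcons : pvConsumeA ind n (res.getLastD "") (t :: rest) =
            pvConsumeA ind n (res.getLastD "" ++ PySem.Str.slice t (some n) none) rest := by
          simp only [pvConsumeA]
          rw [if_pos ⟨hge, heq⟩]
        rw [hcons]
        have hlen := pvConsumeA_len_le ind n
          (res.getLastD "" ++ PySem.Str.slice t (some n) none) rest
        rw [ih _ (by omega) _ _ rfl]
        have hstep : pvFlatStep ind n res t =
            res.dropLast ++ [res.getLastD "" ++ PySem.Str.slice t (some n) none] := by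
          unfold pvFlatStep
          rw [if_pos ⟨hn, hge, heq⟩]
        rw [List.foldl_cons, hstep,
          foldl_flatStep_consume ind n hn rest res.dropLast _]

-- B's reversed loop as a foldr over the original token list
def pvRevB (ind : String) (n : Int) (ts : List String) : List String × String :=
  ts.foldr (fun t st => pvStepB ind n st t) ([], "")

theorem revB_spec (ind : String) (n : Int) (ts : List String) :
    ts.reverse.foldl (pvStepB ind n) ([], "") = pvRevB ind n ts := by
  simp [pvRevB, List.foldl_reverse]

-- the flat forward fold in terms of B's backward pass: for a nonempty accumulator,
-- the pending suffix of ts glues onto the last word and the words follow reversed.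
theorem flat_eq_rev (ind : String) (n : Int) (ts : List String) (res : List String)
    (hres : res ≠ []) :
    ts.foldl (pvFlatStep ind n) res =
      res.dropLast ++ ((res.getLastD "" ++ (pvRevB ind n ts).2) :: (pvRevB ind n ts).1.reverse) := by
  induction ts generalizing res with
  | nil =>
      obtain ⟨ys, y, rfl⟩ : ∃ ys y, res = ys ++ [y] := by
        rcases List.eq_nil_or_concat res with h | ⟨ys, y, h⟩
        · exact absurd h hres
        · exact ⟨ys, y, by simpa using h⟩
      simp [pvRevB]
  | cons t rest ih =>
      have hrev : pvRevB ind n (t :: rest) = pvStepB ind n (pvRevB ind n rest) t := by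
        simp [pvRevB]
      by_cases hc : n ≠ 0 ∧ PySem.Str.len t ≥ n ∧ PySem.Str.slice t none (some n) = ind
      · have hstep : pvFlatStep ind n res t =
            res.dropLast ++ [res.getLastD "" ++ PySem.Str.slice t (some n) none] := by
          unfold pvFlatStep; rw [if_pos hc]
        rw [List.foldl_cons, hstep, ih _ (by simp)]
        rw [hrev]
        unfold pvStepB
        rw [if_pos hc]
        simp [String.append_assoc]
      · have hstep : pvFlatStep ind n res t = res ++ [t] := by
          unfold pvFlatStep; rw [if_neg hc]
        rw [List.foldl_cons, hstep, ih _ (by simp)]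
        rw [hrev]
        unfold pvStepB
        rw [if_neg hc]
        obtain ⟨ys, y, rfl⟩ : ∃ ys y, res = ys ++ [y] := by
          rcases List.eq_nil_or_concat res with h | ⟨ys, y, h⟩
          · exact absurd h hres
          · exact ⟨ys, y, by simpa using h⟩
        simp

-- ===== VERDICT (by name: the statement is the Claim_ definition above) =====
theorem reconstruct_text_from_tokens_spec : Claim_equal_reconstruct_text_from_tokens := by
  intro tokens ind _ hpre
  unfold Spec_reconstruct_text_from_tokens reconstruct_text_from_tokens
    reconstruct_text_from_tokens_alt
  simp only
  rw [revB_spec, pvLoopA_eq_foldl]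
  match tokens with
  | [] => simp [pvRevB]
  | t :: rest =>
      have hnc : ¬ (PySem.Str.len ind ≠ 0 ∧ PySem.Str.len t ≥ PySem.Str.len ind ∧
          PySem.Str.slice t none (some (PySem.Str.len ind)) = ind) := by
        unfold Pre_reconstruct_text_from_tokens at hpre
        simp at hpre
        rintro ⟨h1, h2, h3⟩
        rcases hpre with (h | h) | h
        · rw [h] at h1; simp [PySem.Str.len] at h1
        · simp [PySem.Str.len] at h2; omega
        · exact h h3
      have hstep : pvFlatStep ind (PySem.Str.len ind) [] t = [t] := by
        unfold pvFlatStep; rw [if_neg hnc]; rfl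
      rw [List.foldl_cons, hstep,
        flat_eq_rev ind (PySem.Str.len ind) rest [t] (by simp)]
      have hrev : pvRevB ind (PySem.Str.len ind) (t :: rest) =
          pvStepB ind (PySem.Str.len ind) (pvRevB ind (PySem.Str.len ind) rest) t := by
        simp [pvRevB]
      rw [hrev]
      unfold pvStepB
      rw [if_neg hnc]
      simp
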